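-- pv_equiv track=rewrite | github.com/BackofenLab/B2_10_intro_mapping | helpers/implementation.py | bwm_first_column_interval_form_from_transform_correct
-- ===== SOURCE A (Python) =====
-- def transformation_to_dict_occurrences_correct(t):
--     """
--     This function takes the string transformation (t) and returns the ranking of the transformation.
--     """
--     dict_occurrences = {}
--     for c in t:
--         if c not in dict_occurrences:
--             dict_occurrences[c] = 0
--
--         dict_occurrences[c] += 1
--     return dict_occurrences
--
-- def bwm_first_column_interval_form_from_transform_correct(t):
--     """
--     This function takes the string transformation (t) and returns
--     the first column of the BW matrix in the interval form.
--     I.E. the dictionary where the keys are the characters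
--     and the values are tuples (start, end) of the character occurrences.
--     """
--     f_colum_cumulative = {}
--     c_sum = 0
--     dict_occurrences = transformation_to_dict_occurrences_correct(t)
--     for c, o in sorted(dict_occurrences.items()):
--         f_colum_cumulative[c] = c_sum, c_sum + o
--         c_sum += o
--     return f_colum_cumulative
-- ===== SOURCE B (Python) =====
-- def bwm_first_column_interval_form_from_transform_correct(t):
--     """Sort the string and scan maximal runs of equal characters: the run
--     spanning sorted positions [i, j) gives the interval for that character."""
--     s = sorted(t)
--     result = {}
--     n = len(s)
--     i = 0
--     while i < n:
--         j = i + 1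
--         while j < n and s[j] == s[i]:
--             j += 1
--         result[s[i]] = (i, j)
--         i = j
--     return result
-- ===== Notes on version B (the rewrite author's own statement) =====
-- stated objective: alternative
-- what changed: B builds no occurrence dictionary and no cumulative fold: it sorts the whole string and derives each character's interval directly as the index span [i, j) of its maximal run in the sorted string, via a two-pointer scan.
import Mathlib
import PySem

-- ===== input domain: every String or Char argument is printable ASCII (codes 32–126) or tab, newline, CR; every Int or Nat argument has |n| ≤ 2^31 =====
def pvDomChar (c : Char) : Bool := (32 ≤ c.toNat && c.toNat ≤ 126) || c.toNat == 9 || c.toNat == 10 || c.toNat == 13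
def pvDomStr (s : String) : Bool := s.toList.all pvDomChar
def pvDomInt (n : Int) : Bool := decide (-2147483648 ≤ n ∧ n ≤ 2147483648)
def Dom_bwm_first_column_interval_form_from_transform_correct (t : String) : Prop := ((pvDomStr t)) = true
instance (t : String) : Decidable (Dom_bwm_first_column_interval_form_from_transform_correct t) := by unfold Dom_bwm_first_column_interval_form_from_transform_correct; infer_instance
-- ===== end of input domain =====

-- B replaces A's occurrence dictionary + cumulative fold by sorting the string and
-- reading each character's interval off its maximal run in the sorted string (alternative
-- decomposition, similar cost). Dict keys (1-char Python strings) are emitted as String.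

-- ===== PORT A =====
-- transformation_to_dict_occurrences_correct: the manual counting loop
def pvOccA (t : String) : PySem.Dict Char Int :=
  t.toList.foldl (fun d c =>
    let d1 := if d.contains c then d else d.insert c 0
    d1.insert c (d1.getD c 0 + 1)) PySem.Dict.empty

def bwm_first_column_interval_form_from_transform_correct (t : String) : List (String × Int × Int) :=
  let dict_occurrences := pvOccA t
  let res := (PySem.List.sorted2 dict_occurrences.items (fun p => p.1) (fun p => p.2)).foldl
      (fun (st : PySem.Dict Char (Int × Int) × Int) p =>
         (st.1.insert p.1 (st.2, st.2 + p.2), st.2 + p.2))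
      (PySem.Dict.empty, 0)
  -- the returned dict's 1-char keys become Lean Strings
  res.1.items.map (fun p => (p.1.toString, p.2))

-- ===== PORT B =====
-- the outer while loop: emit the maximal run starting at the head, then continue after it
def pvRunsB : List Char → Int → List (String × Int × Int)
  | [], _ => []
  | c :: rest, i =>
      -- inner while: j advances over the run of c
      let j := i + 1 + (rest.takeWhile (· == c)).length
      (c.toString, i, j) :: pvRunsB (rest.dropWhile (· == c)) j
  termination_by s _ => s.length
  decreasing_by simpa using Nat.lt_succ_of_le (List.length_dropWhile_le _ _)

def bwm_first_column_interval_form_from_transform_correct_alt (t : String) : List (String × Int × Int) :=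
  pvRunsB (PySem.List.sorted t.toList (fun x => x) false) 0

-- ===== PRECONDITION & SPEC =====
def Spec_bwm_first_column_interval_form_from_transform_correct (t : String) (out : List (String × Int × Int)) : Prop := out = bwm_first_column_interval_form_from_transform_correct_alt t
instance (t : String) (out : List (String × Int × Int)) : Decidable (Spec_bwm_first_column_interval_form_from_transform_correct t out) := by unfold Spec_bwm_first_column_interval_form_from_transform_correct; infer_instance

-- ===== CLAIM (what is proved, stated in full; the proofs are below) =====
def Claim_equal_bwm_first_column_interval_form_from_transform_correct : Prop := ∀ (t : String), Dom_bwm_first_column_interval_form_from_transform_correct t → Spec_bwm_first_column_interval_form_from_transform_correct t (bwm_first_column_interval_form_from_transform_correct t)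

-- ===== LEMMAS AND PROOFS =====

-- the common intermediate form: (char, count) pairs in strictly increasing key order
def pvGroup (s : List Char) : List (Char × Int) :=
  (PySem.List.sorted (PySem.Set.ofList s) (fun x => x) false).map (fun c => (c, (s.count c : Int)))

-- cumulative-interval rendering of a (char, count) list
def pvCum : List (Char × Int) → Int → List (Char × Int × Int)
  | [], _ => []
  | (c, o) :: rest, i => (c, i, i + o) :: pvCum rest (i + o)

lemma pvOccA_eq_counter (t : String) : pvOccA t = PySem.Dict.counter t.toList := by
  have hstep : (fun (d : PySem.Dict Char Int) c =>
      let d1 := if d.contains c then d else d.insert c 0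
      d1.insert c (d1.getD c 0 + 1))
      = (fun (d : PySem.Dict Char Int) c => d.insert c (d.getD c 0 + 1)) := by
    funext d c
    by_cases h : d.contains c
    · simp [h]
    · simp only [h, Bool.false_eq_true, if_false]
      rw [PySem.Dict.getD_insert_self, PySem.Dict.insert_insert_self,
          PySem.Dict.getD_of_not_contains d 0 (by simpa using h)]
  unfold pvOccA
  rw [hstep, PySem.Dict.foldl_insert_getD_add_one_eq_counter]

lemma insertBy_congr {α : Type} (b1 b2 : α → α → Bool) (x : α) :
    ∀ ys : List α, (∀ y ∈ ys, b1 x y = b2 x y) →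
      PySem.List.insertBy b1 x ys = PySem.List.insertBy b2 x ys := by
  intro ys
  induction ys with
  | nil => intro _; rfl
  | cons y ys ih =>
      intro h
      simp only [PySem.List.insertBy]
      rw [h y (by simp)]
      by_cases hb : b2 x y
      · simp [hb]
      · simp [hb, ih (fun z hz => h z (by simp [hz]))]

lemma foldl_insertBy_congr {α : Type} (b1 b2 : α → α → Bool) :
    ∀ (l acc : List α), (∀ a ∈ l, ∀ c, (c ∈ l ∨ c ∈ acc) → b1 a c = b2 a c) →
      l.foldl (fun acc x => PySem.List.insertBy b1 x acc) acc
        = l.foldl (fun acc x => PySem.List.insertBy b2 x acc) acc := by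
  intro l
  induction l with
  | nil => intro _ _; rfl
  | cons x l ih =>
      intro acc h
      simp only [List.foldl_cons]
      rw [insertBy_congr b1 b2 x acc (fun y hy => h x (by simp) y (Or.inr hy))]
      refine ih _ ?_
      intro a ha c hc
      apply h a (List.mem_cons_of_mem _ ha)
      rcases hc with hc | hc
      · exact Or.inl (List.mem_cons_of_mem _ hc)
      · rcases (PySem.List.mem_insertBy _ _ _ _).1 hc with hc2 | hc2
        · exact Or.inl (hc2 ▸ List.mem_cons_self)
        · exact Or.inr hc2

-- sorted2 of a list whose fst-values determine its elements = sorted by fst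
lemma sorted2_eq_sorted_fst (L : List (Char × Int))
    (hdet : ∀ a ∈ L, ∀ b ∈ L, a.1 = b.1 → a = b) :
    PySem.List.sorted2 L (fun p => p.1) (fun p => p.2) false
      = PySem.List.sorted L (fun p => p.1) false := by
  unfold PySem.List.sorted2 PySem.List.sorted
  apply foldl_insertBy_congr
  intro a ha c hc
  rcases hc with hc | hc
  · by_cases hk : a.1 = c.1
    · have : a = c := hdet a ha c hc hk
      subst this
      simp
    · rcases lt_or_gt_of_ne hk with hlt | hgt
      · simp [hlt]
      · simp [hgt, not_lt_of_gt hgt]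
  · simp at hc

lemma sorted_items_counter (cs : List Char) :
    PySem.List.sorted2 (PySem.Dict.counter cs).items (fun p => p.1) (fun p => p.2) false
      = pvGroup cs := by
  rw [PySem.Dict.items_counter]
  set L := (PySem.Set.ofList cs).map (fun k => (k, (cs.count k : Int))) with hL
  rw [sorted2_eq_sorted_fst]
  · apply PySem.List.sorted_eq_of_perm_of_pairwise_lt
    · exact ((PySem.List.sorted_perm _ _ _).map _)
    · exact (PySem.List.sorted_ofList_pairwise_lt cs).map _ (by intro a b h; exact h)
  · intro a ha b hb hk
    simp only [hL, List.mem_map] at ha hb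
    obtain ⟨x, _, rfl⟩ := ha
    obtain ⟨y, _, rfl⟩ := hb
    simp only at hk
    simp [hk]

-- A's cumulative fold over fresh distinct keys, as items
lemma foldA_items :
    ∀ (M : List (Char × Int)) (d : PySem.Dict Char (Int × Int)) (i : Int),
      (M.map Prod.fst).Nodup → (∀ p ∈ M, d.contains p.1 = false) →
      (M.foldl (fun (st : PySem.Dict Char (Int × Int) × Int) p =>
          (st.1.insert p.1 (st.2, st.2 + p.2), st.2 + p.2)) (d, i)).1.items
        = d.items ++ pvCum M i := by
  intro M
  induction M with
  | nil => intro d i _ _; simp [pvCum]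
  | cons p M ih =>
      intro d i hnd hfresh
      obtain ⟨c, o⟩ := p
      simp only [List.map_cons, List.nodup_cons] at hnd
      simp only [List.foldl_cons, pvCum]
      rw [ih _ _ hnd.2
            (by intro q hq
                rw [PySem.Dict.contains_insert]
                have hne : q.1 ≠ c := by
                  intro h
                  exact hnd.1 (h ▸ List.mem_map_of_mem hq)
                simp [hne, hfresh q (by simp [hq])]),
          PySem.Dict.items_insert_of_not_contains _ _ (hfresh (c, o) (by simp))]
      simp

-- run structure of a sorted list
lemma dropWhile_gt (c : Char) :
    ∀ rest : List Char, (∀ x ∈ rest, c ≤ x) → rest.Pairwise (· ≤ ·) →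
      ∀ x ∈ rest.dropWhile (· == c), c < x := by
  intro rest
  induction rest with
  | nil => simp
  | cons h t ih =>
      intro hle hp x hx
      by_cases hc : h = c
      · subst hc
        simp only [List.dropWhile_cons, beq_self_eq_true, if_true] at hx
        exact ih (fun y hy => hle y (by simp [hy])) hp.tail x hx
      · have hch : c < h := lt_of_le_of_ne (hle h (by simp)) (Ne.symm hc)
        rw [List.dropWhile_cons_of_neg (by simpa using hc)] at hx
        rcases List.mem_cons.mp hx with rfl | hx
        · exact hch
        · exact lt_of_lt_of_le hch ((List.pairwise_cons.mp hp).1 x hx)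

lemma takeWhile_len_count (c : Char) (rest : List Char)
    (hgt : ∀ x ∈ rest.dropWhile (· == c), c < x) :
    ((rest.takeWhile (· == c)).length : Int) = rest.count c := by
  have hsplit : rest.count c = (rest.takeWhile (· == c)).count c + (rest.dropWhile (· == c)).count c := by
    nth_rewrite 1 [← List.takeWhile_append_dropWhile (p := (· == c)) (l := rest)]
    exact List.count_append
  have h1 : (rest.takeWhile (· == c)).count c = (rest.takeWhile (· == c)).length := by
    apply List.count_eq_length.mpr
    intro y hy
    have hpred := List.mem_takeWhile_imp hy
    have hyc : y = c := by simpa using hpred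
    exact hyc.symm
  have h2 : (rest.dropWhile (· == c)).count c = 0 := by
    apply List.count_eq_zero.mpr
    intro hmem
    exact absurd rfl (ne_of_gt (hgt c hmem))
  omega

lemma pvGroup_cons (c : Char) (rest : List Char)
    (hle : ∀ x ∈ rest, c ≤ x) (hp : rest.Pairwise (· ≤ ·)) :
    pvGroup (c :: rest) = (c, ((c :: rest).count c : Int)) :: pvGroup (rest.dropWhile (· == c)) := by
  have hgt := dropWhile_gt c rest hle hp
  have hsub : List.Sublist (rest.dropWhile (· == c)) rest := List.dropWhile_sublist _
  have hmem : ∀ x ∈ rest, x = c ∨ x ∈ rest.dropWhile (· == c) := by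
    intro x hx
    rw [← List.takeWhile_append_dropWhile (p := (· == c)) (l := rest), List.mem_append] at hx
    rcases hx with hx | hx
    · have hpred := List.mem_takeWhile_imp hx
      exact Or.inl (by simpa using hpred)
    · exact Or.inr hx
  have hnd1 : (c :: PySem.List.sorted (PySem.Set.ofList (rest.dropWhile (· == c))) (fun x => x) false).Nodup := by
    refine List.nodup_cons.mpr ⟨?_, ?_⟩
    · intro hc
      rw [PySem.List.mem_sorted, PySem.Set.mem_ofList] at hc
      exact absurd rfl (ne_of_gt (hgt c hc))
    · exact (PySem.List.sorted_perm _ _ _).nodup_iff.mpr (PySem.Set.nodup_ofList _)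
  have hsorted : PySem.List.sorted (PySem.Set.ofList (c :: rest)) (fun x => x) false
      = c :: PySem.List.sorted (PySem.Set.ofList (rest.dropWhile (· == c))) (fun x => x) false := by
    apply PySem.List.sorted_eq_of_perm_of_pairwise_lt
    · refine (List.perm_ext_iff_of_nodup hnd1 (PySem.Set.nodup_ofList _)).mpr ?_
      intro x
      simp only [List.mem_cons, PySem.List.mem_sorted, PySem.Set.mem_ofList]
      constructor
      · rintro (rfl | hx)
        · exact Or.inl rfl
        · exact Or.inr (hsub.mem hx)
      · rintro (rfl | hx)
        · exact Or.inl rfl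
        · rcases hmem x hx with rfl | hx'
          · exact Or.inl rfl
          · exact Or.inr hx'
    · refine List.pairwise_cons.mpr ⟨?_, ?_⟩
      · intro x hx
        rw [PySem.List.mem_sorted, PySem.Set.mem_ofList] at hx
        exact hgt x hx
      · exact PySem.List.sorted_ofList_pairwise_lt _
  unfold pvGroup
  rw [hsorted]
  simp only [List.map_cons, List.cons.injEq, true_and]
  refine List.map_congr_left ?_
  intro x hx
  rw [PySem.List.mem_sorted, PySem.Set.mem_ofList] at hx
  have hxc : x ≠ c := ne_of_gt (hgt x hx)
  have h1 : (c :: rest).count x = rest.count x := by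
    simp [Ne.symm hxc]
  have h2 : rest.count x = (rest.dropWhile (· == c)).count x := by
    nth_rewrite 1 [← List.takeWhile_append_dropWhile (p := (· == c)) (l := rest)]
    rw [List.count_append]
    have : (rest.takeWhile (· == c)).count x = 0 := by
      apply List.count_eq_zero.mpr
      intro hmem'
      have hpred := List.mem_takeWhile_imp hmem'
      exact hxc (by simpa using hpred)
    omega
  simp [h1, h2]

lemma runsB_eq_cum :
    ∀ (n : Nat) (s : List Char), s.length ≤ n → s.Pairwise (· ≤ ·) → ∀ i : Int,
      pvRunsB s i = (pvCum (pvGroup s) i).map (fun p => (p.1.toString, p.2)) := by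
  intro n
  induction n with
  | zero =>
      intro s hlen _ i
      have : s = [] := List.eq_nil_of_length_eq_zero (Nat.le_zero.mp hlen)
      subst this
      simp [pvRunsB, pvGroup, pvCum, PySem.Set.ofList, PySem.List.sorted]
  | succ n ih =>
      intro s hlen hp i
      cases s with
      | nil => simp [pvRunsB, pvGroup, pvCum, PySem.Set.ofList, PySem.List.sorted]
      | cons c rest =>
          have hle : ∀ x ∈ rest, c ≤ x := (List.pairwise_cons.mp hp).1
          have hgt := dropWhile_gt c rest hle hp.tail
          have htw := takeWhile_len_count c rest hgt
          have hcount : ((c :: rest).count c : Int) = 1 + ((rest.takeWhile (· == c)).length : Int) := by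
            have hc : (c :: rest).count c = rest.count c + 1 := List.count_cons_self
            rw [hc]
            push_cast
            omega
          have hlen' : (rest.dropWhile (· == c)).length ≤ n := by
            have h1 : (rest.dropWhile (· == c)).length ≤ rest.length := List.length_dropWhile_le _ _
            have h2 : rest.length + 1 ≤ n + 1 := by simpa using hlen
            omega
          rw [pvRunsB, pvGroup_cons c rest hle hp.tail]
          simp only [pvCum, List.map_cons]
          refine congrArg₂ _ ?_ ?_
          · simp only [Prod.mk.injEq, true_and]
            omega
          · rw [ih (rest.dropWhile (· == c)) hlen'
                  ((List.pairwise_cons.mp hp).2.sublist (List.dropWhile_sublist _))]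
            have heq : i + 1 + ((rest.takeWhile (· == c)).length : Int) = i + ((c :: rest).count c : Int) := by
              omega
            rw [heq]

-- ===== VERDICT (by name: the statement is the Claim_ definition above) =====
theorem bwm_first_column_interval_form_from_transform_correct_spec : Claim_equal_bwm_first_column_interval_form_from_transform_correct := by
  intro t _
  unfold Spec_bwm_first_column_interval_form_from_transform_correct
  unfold bwm_first_column_interval_form_from_transform_correct
  unfold bwm_first_column_interval_form_from_transform_correct_alt
  simp only []
  set cs := t.toList with hcs
  set s := PySem.List.sorted cs (fun x => x) false with hs
  have hA : (PySem.List.sorted2 (pvOccA t).items (fun p => p.1) (fun p => p.2) false).foldl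
      (fun (st : PySem.Dict Char (Int × Int) × Int) p =>
         (st.1.insert p.1 (st.2, st.2 + p.2), st.2 + p.2))
      (PySem.Dict.empty, 0) |>.1.items = pvCum (pvGroup cs) 0 := by
    rw [pvOccA_eq_counter, sorted_items_counter]
    have hnodup : ((pvGroup cs).map Prod.fst).Nodup := by
      unfold pvGroup
      rw [List.map_map]
      have : (Prod.fst ∘ fun c => (c, (cs.count c : Int))) = id := rfl
      rw [this, List.map_id]
      exact (PySem.List.sorted_perm _ _ _).nodup_iff.mpr (PySem.Set.nodup_ofList _)
    rw [foldA_items (pvGroup cs) PySem.Dict.empty 0 hnodup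
          (by intro p _; exact PySem.Dict.contains_empty _)]
    simp [PySem.Dict.empty]
  have hGroup : pvGroup s = pvGroup cs := by
    unfold pvGroup
    have hperm : s.Perm cs := PySem.List.sorted_perm _ _ _
    have hsetperm : (PySem.Set.ofList s).Perm (PySem.Set.ofList cs) := by
      refine (List.perm_ext_iff_of_nodup (PySem.Set.nodup_ofList _) (PySem.Set.nodup_ofList _)).mpr ?_
      intro x
      rw [PySem.Set.mem_ofList, PySem.Set.mem_ofList]
      exact ⟨fun h => hperm.mem_iff.mp h, fun h => hperm.mem_iff.mpr h⟩
    rw [PySem.List.sorted_eq_sorted_of_perm _ _ _ (fun a b h => h) hsetperm]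
    refine List.map_congr_left ?_
    intro x _
    rw [hperm.count_eq]
  have hB : pvRunsB s 0 = (pvCum (pvGroup cs) 0).map (fun p => (p.1.toString, p.2)) := by
    rw [runsB_eq_cum s.length s le_rfl
          (by simpa using PySem.List.sorted_pairwise cs (fun x => x)), hGroup]
  rw [hA, ← hB]
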